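-- pv_equiv track=rewrite | github.com/helweras/Poker | Players.py | triple_or_triple_full
-- ===== SOURCE A (Python) =====
-- def triple_or_triple_full(pl_cards):
--     resp_list = []
--     count_item = {key: [] for key in range(2, 15)}
--     for card in pl_cards:
--         count_item[card[-1]].append(card)
--     for key in list(count_item.keys())[::-1]:
--         if len(count_item[key]) == 3:
--             resp_list += count_item[key]
--     resp_list.sort(key=lambda x: x[-1], reverse=True)
--     return resp_list[:-1]
-- ===== SOURCE B (Python) =====
-- def triple_or_triple_full(pl_cards):
--     # One counting pass over a fixed 2..14 rank table, then a selection-style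
--     # recursion that peels off the highest remaining rank group (no dict of
--     # card lists, no final sort).
--     counts = {rank: 0 for rank in range(2, 15)}
--     for card in pl_cards:
--         counts[card[-1]] += 1
--     def groups(cards):
--         if not cards:
--             return []
--         m = max(card[-1] for card in cards)
--         keep = [card for card in cards if card[-1] == m] if counts[m] == 3 else []
--         rest = [card for card in cards if card[-1] != m]
--         return keep + groups(rest)
--     return groups(pl_cards)[:-1]
-- ===== Notes on version B (the rewrite author's own statement) =====
-- stated objective: alternative
-- what changed: A buckets full cards into a fixed rank-keyed dict of lists, walks the reversed key list concatenating length-3 buckets and re-sorts the result; B instead makes one counting pass over the fixed 2..14 rank table and then emits groups by a sort-free selection-style recursion that repeatedly peels off the highest remaining rank.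
import Mathlib
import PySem

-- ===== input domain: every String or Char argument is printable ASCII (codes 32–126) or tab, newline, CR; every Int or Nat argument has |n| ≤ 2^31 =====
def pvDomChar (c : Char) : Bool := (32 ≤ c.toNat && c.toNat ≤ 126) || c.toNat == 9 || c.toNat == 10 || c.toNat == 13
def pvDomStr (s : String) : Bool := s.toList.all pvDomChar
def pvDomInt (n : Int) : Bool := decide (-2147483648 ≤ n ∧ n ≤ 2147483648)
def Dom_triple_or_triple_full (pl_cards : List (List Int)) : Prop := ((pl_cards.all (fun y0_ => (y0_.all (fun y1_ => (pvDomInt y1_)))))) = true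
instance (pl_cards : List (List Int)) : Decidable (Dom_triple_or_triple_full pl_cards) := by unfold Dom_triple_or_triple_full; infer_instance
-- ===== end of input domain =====

-- B replaces A's dict of card buckets + reversed-key walk + final sort by a counting pass over
-- the fixed 2..14 rank table followed by a sort-free selection-style recursion that peels off
-- the highest remaining rank group; objective: alternative.

-- card[-1], exact for nonempty cards (Pre_ guarantees this; default 0 otherwise)
def pvRank (card : List Int) : Int := PySem.List.pyGetD card (-1) 0

-- ===== PORT A =====
-- {key: [] for key in range(2, 15)}
def pvDictA0 : PySem.Dict Int (List (List Int)) :=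
  (PySem.List.pyRange 2 15 1).foldl (fun d key => d.insert key []) PySem.Dict.empty

def triple_or_triple_full (pl_cards : List (List Int)) : List (List Int) :=
  let count_item :=
    pl_cards.foldl
      (fun d card => d.modify (pvRank card) [] (fun bucket => bucket ++ [card]))
      pvDictA0
  let resp_list :=
    ((PySem.List.slice? count_item.keys none none (-1)).getD []).foldl
      (fun acc key =>
        if (count_item.getD key []).length == 3 then acc ++ count_item.getD key [] else acc)
      ([] : List (List Int))
  PySem.List.slice (PySem.List.sorted resp_list pvRank true) none (some (-1))

-- ===== PORT B =====
-- {rank: 0 for rank in range(2, 15)}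
def pvDictB0 : PySem.Dict Int Int :=
  (PySem.List.pyRange 2 15 1).foldl (fun d rank => d.insert rank (0 : Int)) PySem.Dict.empty

-- the inner recursive helper 'groups' (closing over the counts table); fuel = initial list
-- length makes the recursion structural (each call strictly shrinks the list, so the fuel is
-- never exhausted)
def pvGroups (counts : PySem.Dict Int Int) : Nat → List (List Int) → List (List Int)
  | _, [] => []
  | 0, _ :: _ => []
  | fuel + 1, c :: cs =>
    let m := (PySem.List.max? ((c :: cs).map pvRank) (fun x => x)).getD 0
    let keep := if counts.getD m 0 == 3
      then (c :: cs).filter (fun card => pvRank card == m) else []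
    let rest := (c :: cs).filter (fun card => !(pvRank card == m))
    keep ++ pvGroups counts fuel rest

def triple_or_triple_full_alt (pl_cards : List (List Int)) : List (List Int) :=
  let counts :=
    pl_cards.foldl (fun d card => d.modify (pvRank card) 0 (fun n => n + 1)) pvDictB0
  PySem.List.slice (pvGroups counts pl_cards.length pl_cards) none (some (-1))

-- ===== PRECONDITION & SPEC =====
-- Pre_ excludes exactly the inputs on which the Python A raises: an empty card (IndexError on
-- card[-1]) or a card whose rank card[-1] is outside 2..14 (KeyError on the fixed dict).
def Pre_triple_or_triple_full (pl_cards : List (List Int)) : Prop :=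
  ∀ card ∈ pl_cards, card ≠ [] ∧ 2 ≤ pvRank card ∧ pvRank card ≤ 14

instance (pl_cards : List (List Int)) : Decidable (Pre_triple_or_triple_full pl_cards) := by
  unfold Pre_triple_or_triple_full; infer_instance

def pvWitness_triple_or_triple_full : List (List Int) := [[5, 3], [7, 3], [9, 3]]

def Spec_triple_or_triple_full (pl_cards : List (List Int)) (out : List (List Int)) : Prop := out = triple_or_triple_full_alt pl_cards
instance (pl_cards : List (List Int)) (out : List (List Int)) : Decidable (Spec_triple_or_triple_full pl_cards out) := by unfold Spec_triple_or_triple_full; infer_instance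

-- ===== CLAIM (what is proved, stated in full; the proofs are below) =====
def Claim_equal_triple_or_triple_full : Prop := ∀ (pl_cards : List (List Int)), Dom_triple_or_triple_full pl_cards → Pre_triple_or_triple_full pl_cards → Spec_triple_or_triple_full pl_cards (triple_or_triple_full pl_cards)

-- ===== LEMMAS AND PROOFS =====

-- The bucket a key holds after A's grouping pass: whatever was there, plus the cards with that rank.
theorem pv_bucket_getD (l : List (List Int)) (d : PySem.Dict Int (List (List Int))) (k : Int) :
    (l.foldl
      (fun d card => d.modify (pvRank card) [] (fun bucket => bucket ++ [card]))
      d).getD k []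
    = d.getD k [] ++ l.filter (fun c => pvRank c == k) := by
  induction l generalizing d with
  | nil => simp
  | cons a l ih =>
    simp only [List.foldl_cons, ih, List.filter_cons]
    by_cases h : pvRank a = k
    · rw [h, PySem.Dict.getD_modify_self]
      simp
    · rw [PySem.Dict.getD_modify_of_ne _ _ _ (Ne.symm h)]
      simp [h]

-- Updating a set with elements it already contains changes nothing.
theorem pv_update_of_subset (xs : List Int) (s : PySem.Set Int)
    (h : ∀ x ∈ xs, x ∈ s) : PySem.Set.update s xs = s := by
  induction xs generalizing s with
  | nil => rfl
  | cons a xs ih =>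
    have ha : PySem.Set.add s a = s := by
      simp [PySem.Set.add, h a (by simp)]
    show PySem.Set.update (PySem.Set.add s a) xs = s
    rw [ha]
    exact ih s (fun x hx => h x (by simp [hx]))

-- A descending key list of groups of constant key is pairwise key-descending.
theorem pv_pairwise_flatMap (ks : List Int) (g : Int → List (List Int))
    (hks : ks.Pairwise (fun a b => b < a))
    (hg : ∀ k, ∀ x ∈ g k, pvRank x = k) :
    (ks.flatMap g).Pairwise (fun a b => pvRank b ≤ pvRank a) := by
  induction ks with
  | nil => simp
  | cons k ks ih =>
    rw [List.pairwise_cons] at hks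
    rw [List.flatMap_cons, List.pairwise_append]
    refine ⟨?_, ih hks.2, ?_⟩
    · exact List.pairwise_of_forall_mem_list
        (fun x hx y hy => by rw [hg k x hx, hg k y hy])
    · intro x hx y hy
      rcases List.mem_flatMap.mp hy with ⟨k', hk', hy'⟩
      rw [hg k x hx, hg k' y hy']
      exact le_of_lt (hks.1 k' hk')

theorem pv_flatMap_congr {α β : Type} (l : List α) (f g : α → List β)
    (h : ∀ x ∈ l, f x = g x) : l.flatMap f = l.flatMap g := by
  induction l with
  | nil => rfl
  | cons a l ih =>
    rw [List.flatMap_cons, List.flatMap_cons, h a (by simp), ih (fun x hx => h x (by simp [hx]))]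

-- B's counting pass counts the cards with each rank.
theorem pv_count_getD (l : List (List Int)) (d : PySem.Dict Int Int) (k : Int) :
    (l.foldl (fun d card => d.modify (pvRank card) 0 (fun n => n + 1)) d).getD k 0
    = d.getD k 0 + (l.countP (fun c => pvRank c == k) : Int) := by
  have hmap :
      l.foldl (fun d card => d.modify (pvRank card) 0 (fun n => n + 1)) d
      = (l.map pvRank).foldl (fun d x => d.modify x 0 (fun n => n + 1)) d := by
    rw [List.foldl_map]
  rw [hmap, PySem.Dict.getD_foldl_modify_add_one]
  simp only [List.count_eq_countP, List.countP_map, Function.comp_def]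

-- B's recursion, characterised: peeling max-rank groups over a strictly descending key list
-- covering all ranks yields the concatenation of the length-3 rank filters in key order.
theorem pv_groups_flatMap (counts : PySem.Dict Int Int) (ks : List Int) :
    ∀ (fuel : Nat) (cards : List (List Int)), cards.length ≤ fuel →
    ks.Pairwise (fun a b => b < a) →
    (∀ c ∈ cards, pvRank c ∈ ks) →
    pvGroups counts fuel cards
      = ks.flatMap (fun k =>
          if counts.getD k 0 == 3
          then cards.filter (fun c => pvRank c == k) else []) := by
  induction ks with
  | nil =>
    intro fuel cards _ _ hsub
    cases cards with
    | nil => cases fuel <;> simp [pvGroups]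
    | cons c cs => exact absurd (hsub c (by simp)) (by simp)
  | cons k ks ih =>
    intro fuel cards hfuel hdesc hsub
    rw [List.pairwise_cons] at hdesc
    cases cards with
    | nil =>
      cases fuel <;> simp [pvGroups]
    | cons c cs =>
      cases fuel with
      | zero => simp at hfuel
      | succ f =>
        by_cases hk : ∃ x ∈ c :: cs, pvRank x = k
        · -- k is present, hence it is the maximum rank: peel it off
          obtain ⟨w, hw, hwk⟩ := hk
          have hle : ∀ r ∈ (c :: cs).map pvRank, r ≤ k := by
            intro r hr
            rcases List.mem_map.mp hr with ⟨x, hx, rfl⟩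
            rcases List.mem_cons.mp (hsub x hx) with h | h
            · exact le_of_eq h
            · exact le_of_lt (hdesc.1 _ h)
          have hsome : PySem.List.max? ((c :: cs).map pvRank) (fun x => x) =
              some ((cs.map pvRank).foldl max (pvRank c)) := by
            simpa using PySem.List.max?_id_cons (pvRank c) (cs.map pvRank)
          have hmem := PySem.List.max?_mem hsome
          have hmax := PySem.List.max?_isMax hsome
          have hm : (PySem.List.max? ((c :: cs).map pvRank) (fun x => x)).getD 0 = k := by
            rw [hsome]
            refine le_antisymm (hle _ hmem) ?_
            simpa [hwk] using hmax (pvRank w) (List.mem_map_of_mem hw)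
          have hrestlen :
              ((c :: cs).filter (fun card => !(pvRank card == k))).length ≤ f := by
            have hlt : ((c :: cs).filter (fun card => !(pvRank card == k))).length
                < (c :: cs).length := by
              refine List.length_filter_lt_length_iff_exists.mpr ⟨w, hw, ?_⟩
              simp [hwk]
            omega
          have hrestsub : ∀ x ∈ (c :: cs).filter (fun card => !(pvRank card == k)),
              pvRank x ∈ ks := by
            intro x hx
            rw [List.mem_filter] at hx
            rcases List.mem_cons.mp (hsub x hx.1) with h | h
            · exact absurd h (by simpa using hx.2)
            · exact h
          have hrec := ih f ((c :: cs).filter (fun card => !(pvRank card == k)))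
            hrestlen hdesc.2 hrestsub
          show (let m := (PySem.List.max? ((c :: cs).map pvRank) (fun x => x)).getD 0
                let keep := if counts.getD m 0 == 3
                  then (c :: cs).filter (fun card => pvRank card == m) else []
                let rest := (c :: cs).filter (fun card => !(pvRank card == m))
                keep ++ pvGroups counts f rest) = _
          simp only [hm]
          rw [hrec, List.flatMap_cons]
          congr 1
          refine pv_flatMap_congr _ _ _ ?_
          intro k' hk'
          have hne : k' ≠ k := ne_of_lt (hdesc.1 k' hk')
          have hff : ((c :: cs).filter (fun card => !(pvRank card == k))).filter
                (fun cc => pvRank cc == k')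
              = (c :: cs).filter (fun cc => pvRank cc == k') := by
            rw [List.filter_filter]
            refine List.filter_congr ?_
            intro x _
            by_cases h : pvRank x = k' <;> simp [h, hne]
          rw [hff]
        · -- k is absent: its filter is empty and the recursion is unchanged
          push_neg at hk
          have hfe : (c :: cs).filter (fun cc => pvRank cc == k) = [] := by
            rw [List.filter_eq_nil_iff]
            intro x hx
            simpa using hk x hx
          have hsub' : ∀ x ∈ c :: cs, pvRank x ∈ ks := by
            intro x hx
            rcases List.mem_cons.mp (hsub x hx) with h | h
            · exact absurd h (by simpa using hk x hx)
            · exact h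
          rw [List.flatMap_cons, hfe]
          have := ih (f + 1) (c :: cs) hfuel hdesc.2 hsub'
          simpa using this

theorem pv_main (pl_cards : List (List Int))
    (hpre : Pre_triple_or_triple_full pl_cards) :
    triple_or_triple_full pl_cards = triple_or_triple_full_alt pl_cards := by
  have hkey : ∀ c ∈ pl_cards, 2 ≤ pvRank c ∧ pvRank c ≤ 14 :=
    fun c hc => (hpre c hc).2
  -- the keys of A's dict stay [2..14]
  have hkeysA :
      (pl_cards.foldl
        (fun d card => d.modify (pvRank card) [] (fun bucket => bucket ++ [card]))
        pvDictA0).keys = PySem.List.pyRange 2 15 1 := by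
    rw [PySem.Dict.keys_foldl_modify_key pl_cards (fun card => pvRank card)
      [] (fun _ card => fun bucket => bucket ++ [card]) pvDictA0]
    have h0 : pvDictA0.keys = PySem.List.pyRange 2 15 1 := by decide
    rw [h0]
    refine pv_update_of_subset _ _ ?_
    intro x hx
    rcases List.mem_map.mp hx with ⟨c, hc, rfl⟩
    exact (PySem.List.mem_pyRange_one).mpr ⟨(hkey c hc).1, by have := (hkey c hc).2; omega⟩
  have hrev : (PySem.List.pyRange 2 15 1 : List Int).reverse = PySem.List.pyRange 14 1 (-1) := by
    decide
  have hA0 : ∀ k ∈ PySem.List.pyRange 14 1 (-1), pvDictA0.getD k ([] : List (List Int)) = [] := by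
    decide
  set fl := fun k : Int => pl_cards.filter (fun c => pvRank c == k) with hfl
  set F := fun (acc : List (List Int)) (k : Int) =>
    acc ++ (if (fl k).length == 3 then fl k else []) with hF
  simp only [triple_or_triple_full, triple_or_triple_full_alt, hkeysA,
    PySem.List.slice?_none_none_neg_one, Option.getD_some, hrev]
  have hafold :
      (PySem.List.pyRange 14 1 (-1)).foldl
        (fun acc key =>
          if ((pl_cards.foldl (fun d card => d.modify (pvRank card) []
                (fun bucket => bucket ++ [card])) pvDictA0).getD key []).length == 3 then
            acc ++ (pl_cards.foldl (fun d card => d.modify (pvRank card) []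
                (fun bucket => bucket ++ [card])) pvDictA0).getD key []
          else acc) ([] : List (List Int))
      = (PySem.List.pyRange 14 1 (-1)).foldl F [] := by
    refine PySem.List.foldl_congr_mem _ _ _ _ ?_
    intro acc k hk
    rw [pv_bucket_getD, hA0 k hk, List.nil_append, hF, hfl]
    by_cases h3 : (pl_cards.filter (fun c => pvRank c == k)).length = 3 <;>
      simp [h3]
  rw [hafold]
  have hflat : (PySem.List.pyRange 14 1 (-1)).foldl F []
      = (PySem.List.pyRange 14 1 (-1)).flatMap
          (fun k => if (fl k).length == 3 then fl k else []) := by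
    rw [hF, PySem.List.foldl_append_eq_flatMap, List.nil_append]
  -- A's final sort is the identity: the loop output is already rank-descending
  have hpair :
      ((PySem.List.pyRange 14 1 (-1)).foldl F []).Pairwise
        (fun a b => pvRank b ≤ pvRank a) := by
    rw [hflat]
    refine pv_pairwise_flatMap _ _ (by decide) ?_
    intro k x hx
    have hx' : x ∈ fl k := by
      by_cases h3 : (fl k).length == 3 <;> simp [h3] at hx
      · exact hx
    simp only [hfl, List.mem_filter, beq_iff_eq] at hx'
    exact hx'.2
  rw [PySem.List.sorted_rev_eq_self_of_pairwise _ _ hpair]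
  -- B's recursion computes the same flatMap
  have hdesc : (PySem.List.pyRange 14 1 (-1) : List Int).Pairwise (fun a b => b < a) := by
    decide
  have hmemks : ∀ x : Int, 2 ≤ x → x ≤ 14 → x ∈ (PySem.List.pyRange 14 1 (-1) : List Int) := by
    have h14 : (PySem.List.pyRange 14 1 (-1) : List Int)
        = [14, 13, 12, 11, 10, 9, 8, 7, 6, 5, 4, 3, 2] := by decide
    intro x h2 h14'
    rw [h14]
    simp only [List.mem_cons, List.not_mem_nil, or_false]
    omega
  have hB0 : ∀ k ∈ (PySem.List.pyRange 14 1 (-1) : List Int), pvDictB0.getD k (0 : Int) = 0 := by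
    decide
  have hgroups := pv_groups_flatMap
    (pl_cards.foldl (fun d card => d.modify (pvRank card) 0 (fun n => n + 1)) pvDictB0)
    (PySem.List.pyRange 14 1 (-1)) pl_cards.length pl_cards
    (le_refl _) hdesc
    (fun c hc => hmemks _ (hkey c hc).1 (hkey c hc).2)
  rw [hgroups, hflat]
  congr 1
  refine pv_flatMap_congr _ _ _ ?_
  intro k hk
  rw [pv_count_getD, hB0 k hk, zero_add, List.countP_eq_length_filter]
  by_cases h3 : (pl_cards.filter (fun c => pvRank c == k)).length = 3
  · simp [hfl, h3]
  · have hne : ((pl_cards.filter (fun c => pvRank c == k)).length : Int) ≠ 3 := by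
      omega
    simp [hfl, h3, hne]

-- ===== VERDICT (by name: the statement is the Claim_ definition above) =====
theorem triple_or_triple_full_spec : Claim_equal_triple_or_triple_full := by
  intro pl_cards _ hpre
  unfold Spec_triple_or_triple_full
  exact pv_main pl_cards hpre
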